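-- pv_equiv track=rewrite | github.com/traian-d/compact_cellular_automata | topology_functions.py | rectangular_four_neighbors
-- ===== SOURCE A (Python) =====
-- def rectangular_four_neighbors(n_rows, n_cols):
--     adj_dict = {}
--
--     for i in range(n_rows):
--         for j in range(n_cols):
--             loc = i * n_cols + j
--             if loc not in adj_dict:
--                 adj_dict[loc] = []
--
--             if i > 0:
--                 adj_dict[loc].append((i - 1) * n_cols + j)
--             if i < n_rows - 1:
--                 adj_dict[loc].append((i + 1) * n_cols + j)
--
--             if j > 0:
--                 adj_dict[loc].append(i * n_cols + j - 1)
--             if j < n_cols - 1: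
--                 adj_dict[loc].append(i * n_cols + j + 1)
--
--     return False, adj_dict
-- ===== SOURCE B (Python) =====
-- def rectangular_four_neighbors(n_rows, n_cols):
--     # Edge-based construction: seed every cell with an empty list, then walk
--     # the vertical edges (adds up/down neighbors) and the horizontal edges
--     # (adds left/right neighbors).
--     adj_dict = {i * n_cols + j: [] for i in range(n_rows) for j in range(n_cols)}
--     for i in range(n_rows - 1):
--         for j in range(n_cols):
--             upper = i * n_cols + j
--             lower = upper + n_cols
--             adj_dict[upper].append(lower)
--             adj_dict[lower].append(upper)
--     for i in range(n_rows):
--         for j in range(n_cols - 1):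
--             left = i * n_cols + j
--             right = left + 1
--             adj_dict[left].append(right)
--             adj_dict[right].append(left)
--     return False, adj_dict
-- ===== Notes on version B (the rewrite author's own statement) =====
-- stated objective: alternative
-- what changed: B pre-seeds every cell with an empty neighbor list and then builds the adjacency edge-by-edge — one pass over the grid's vertical edges, then one over its horizontal edges, appending both endpoints of each edge — instead of A's single per-cell pass that membership-tests the dict and appends each cell's four neighbors locally.
import Mathlib
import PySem

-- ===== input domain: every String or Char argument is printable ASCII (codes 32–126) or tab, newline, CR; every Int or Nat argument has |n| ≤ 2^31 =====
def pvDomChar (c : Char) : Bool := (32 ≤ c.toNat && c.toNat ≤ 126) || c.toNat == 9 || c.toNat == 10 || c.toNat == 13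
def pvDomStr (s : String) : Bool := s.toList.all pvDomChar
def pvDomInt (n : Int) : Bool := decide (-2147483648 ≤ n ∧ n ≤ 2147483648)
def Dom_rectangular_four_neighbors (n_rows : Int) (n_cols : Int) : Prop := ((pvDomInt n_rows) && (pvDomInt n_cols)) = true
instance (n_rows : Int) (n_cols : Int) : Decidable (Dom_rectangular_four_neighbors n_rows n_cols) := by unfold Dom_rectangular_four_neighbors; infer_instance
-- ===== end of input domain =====

-- B builds the adjacency dict edge-by-edge: it pre-seeds every cell with an empty
-- list, then walks the vertical edges and then the horizontal edges, appending both
-- endpoints of each edge — instead of A's single per-cell pass that membership-tests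
-- and appends each cell's four neighbors locally (objective: alternative).

-- ===== PORT A =====
def rectangular_four_neighbors (n_rows : Int) (n_cols : Int) : Bool × (List (Int × List Int)) :=
  let adj := (PySem.List.pyRange 0 n_rows 1).foldl (fun d i =>
    (PySem.List.pyRange 0 n_cols 1).foldl (fun d j =>
      let loc := i * n_cols + j
      let d := if ¬ (d.contains loc = true) then d.insert loc ([] : List Int) else d
      let d := if 0 < i then d.modify loc [] (fun l => l ++ [(i - 1) * n_cols + j]) else d
      let d := if i < n_rows - 1 then d.modify loc [] (fun l => l ++ [(i + 1) * n_cols + j]) else d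
      let d := if 0 < j then d.modify loc [] (fun l => l ++ [i * n_cols + j - 1]) else d
      let d := if j < n_cols - 1 then d.modify loc [] (fun l => l ++ [i * n_cols + j + 1]) else d
      d) d) (PySem.Dict.empty : PySem.Dict Int (List Int))
  (false, adj.items)

-- ===== PORT B =====
-- Python's `adj_dict[k].append(v)` (k always present) is `modify k [] (· ++ [v])`.
def rectangular_four_neighbors_alt (n_rows : Int) (n_cols : Int) : Bool × (List (Int × List Int)) :=
  let adj := (PySem.List.pyRange 0 n_rows 1).foldl (fun d i =>
    (PySem.List.pyRange 0 n_cols 1).foldl (fun d j =>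
      d.insert (i * n_cols + j) ([] : List Int)) d) (PySem.Dict.empty : PySem.Dict Int (List Int))
  let adj := (PySem.List.pyRange 0 (n_rows - 1) 1).foldl (fun d i =>
    (PySem.List.pyRange 0 n_cols 1).foldl (fun d j =>
      let upper := i * n_cols + j
      let lower := upper + n_cols
      let d := d.modify upper [] (fun l => l ++ [lower])
      d.modify lower [] (fun l => l ++ [upper])) d) adj
  let adj := (PySem.List.pyRange 0 n_rows 1).foldl (fun d i =>
    (PySem.List.pyRange 0 (n_cols - 1) 1).foldl (fun d j =>
      let left := i * n_cols + j
      let right := left + 1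
      let d := d.modify left [] (fun l => l ++ [right])
      d.modify right [] (fun l => l ++ [left])) d) adj
  (false, adj.items)

-- ===== PRECONDITION & SPEC =====
def Spec_rectangular_four_neighbors (n_rows : Int) (n_cols : Int) (out : Bool × (List (Int × List Int))) : Prop := out = rectangular_four_neighbors_alt n_rows n_cols
instance (n_rows : Int) (n_cols : Int) (out : Bool × (List (Int × List Int))) : Decidable (Spec_rectangular_four_neighbors n_rows n_cols out) := by unfold Spec_rectangular_four_neighbors; infer_instance

-- ===== CLAIM (what is proved, stated in full; the proofs are below) =====
def Claim_equal_rectangular_four_neighbors : Prop := ∀ (n_rows : Int) (n_cols : Int), Dom_rectangular_four_neighbors n_rows n_cols → Spec_rectangular_four_neighbors n_rows n_cols (rectangular_four_neighbors n_rows n_cols)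

-- ===== LEMMAS AND PROOFS =====

-- The neighbor list A accumulates for cell (i, j).
def pvNbrsA (r c i j : Int) : List Int :=
  (if 0 < i then [(i - 1) * c + j] else []) ++
  (if i < r - 1 then [(i + 1) * c + j] else []) ++
  (if 0 < j then [i * c + j - 1] else []) ++
  (if j < c - 1 then [i * c + j + 1] else [])

-- A's inner-loop body, named for the proofs (definitionally the port's body).
def pvBodyA (r c : Int) (d : PySem.Dict Int (List Int)) (i j : Int) : PySem.Dict Int (List Int) :=
  let loc := i * c + j
  let d := if ¬ (d.contains loc = true) then d.insert loc ([] : List Int) else d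
  let d := if 0 < i then d.modify loc [] (fun l => l ++ [(i - 1) * c + j]) else d
  let d := if i < r - 1 then d.modify loc [] (fun l => l ++ [(i + 1) * c + j]) else d
  let d := if 0 < j then d.modify loc [] (fun l => l ++ [i * c + j - 1]) else d
  let d := if j < c - 1 then d.modify loc [] (fun l => l ++ [i * c + j + 1]) else d
  d

lemma pv_getD_last (X : List (Int × List Int)) (loc : Int) (l : List Int)
    (h : ∀ p ∈ X, p.1 ≠ loc) :
    (PySem.Dict.mk (X ++ [(loc, l)]) : PySem.Dict Int (List Int)).getD loc [] = l := by
  induction X with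
  | nil => simp [PySem.Dict.getD, PySem.Dict.get?]
  | cons p X ih =>
    have hp : p.1 ≠ loc := h p (by simp)
    rcases p with ⟨k, v⟩
    simp only [List.cons_append]
    rw [PySem.Dict.getD_eq_get?_getD, PySem.Dict.get?_mk_cons]
    rw [show (k == loc) = false by simpa using hp, if_neg (by simp)]
    rw [← PySem.Dict.getD_eq_get?_getD]
    exact ih (fun q hq => h q (by simp [hq]))

-- modifying the freshly appended last entry rewrites it in place
lemma pv_modify_last (X : List (Int × List Int)) (loc : Int) (l : List Int)
    (f : List Int → List Int) (h : ∀ p ∈ X, p.1 ≠ loc) :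
    (PySem.Dict.mk (X ++ [(loc, l)]) : PySem.Dict Int (List Int)).modify loc [] f
      = PySem.Dict.mk (X ++ [(loc, f l)]) := by
  have hg := pv_getD_last X loc l h
  simp only [PySem.Dict.modify, hg]
  have hcon : (PySem.Dict.mk (X ++ [(loc, l)]) : PySem.Dict Int (List Int)).contains loc = true := by
    simp [PySem.Dict.contains]
  simp only [PySem.Dict.insert, hcon, if_pos]
  congr 1
  simp only [List.map_append]
  congr 1
  · conv_rhs => rw [← List.map_id X]
    apply List.map_congr_left
    intro p hp
    rw [if_neg (by simpa using h p hp)]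
    rfl
  · simp

lemma pv_contains_of_not_key (d : PySem.Dict Int (List Int)) (loc : Int)
    (h : ∀ p ∈ d.items, p.1 ≠ loc) : d.contains loc = false := by
  simp only [PySem.Dict.contains, List.any_eq_false]
  intro p hp
  simpa using h p hp

-- one step of A appends the finished cell entry
lemma pv_bodyA_items (r c i j : Int) (d : PySem.Dict Int (List Int))
    (h : ∀ p ∈ d.items, p.1 ≠ i * c + j) :
    pvBodyA r c d i j = PySem.Dict.mk (d.items ++ [(i * c + j, pvNbrsA r c i j)]) := by
  have hcon : d.contains (i * c + j) = false := pv_contains_of_not_key d _ h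
  unfold pvBodyA
  dsimp only
  have h1 : d.insert (i * c + j) ([] : List Int) = PySem.Dict.mk (d.items ++ [(i * c + j, [])]) := by
    simp [PySem.Dict.insert, hcon]
  rw [hcon]
  simp only [Bool.false_eq_true, not_false_eq_true, if_true, h1]
  unfold pvNbrsA
  split_ifs with h2 h3 h4 h5 <;>
    simp [pv_modify_last _ _ _ _ h]

-- A's inner loop from column a appends the rest of the row
lemma pv_rowA (r c i : Int) : ∀ (n : Nat) (a : Int) (d : PySem.Dict Int (List Int)),
    (c - a).toNat = n →
    (∀ p ∈ d.items, ∀ j : Int, a ≤ j → j < c → p.1 ≠ i * c + j) →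
    (PySem.List.pyRange a c 1).foldl (fun d j => pvBodyA r c d i j) d
      = PySem.Dict.mk (d.items ++ (PySem.List.pyRange a c 1).map (fun j => (i * c + j, pvNbrsA r c i j))) := by
  intro n
  induction n with
  | zero =>
    intro a d hn _
    rw [PySem.List.pyRange_one_eq_nil (by omega)]
    simp
  | succ n ih =>
    intro a d hn h
    have hac : a < c := by omega
    rw [PySem.List.pyRange_one_cons hac]
    simp only [List.foldl_cons, List.map_cons]
    rw [pv_bodyA_items r c i a d (fun p hp => h p hp a le_rfl hac)]
    rw [ih (a + 1) _ (by omega) ?_]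
    · simp
    · intro p hp j hj hjc
      rcases List.mem_append.mp hp with hp | hp
      · exact h p hp j (by omega) hjc
      · rw [List.mem_singleton] at hp
        subst hp
        simp only [ne_eq]
        intro hEq
        have : a = j := by linarith
        omega

-- A's outer loop from row a appends the remaining rows
lemma pv_outerA (r c : Int) (hc : 0 < c) : ∀ (n : Nat) (a : Int) (d : PySem.Dict Int (List Int)),
    (r - a).toNat = n →
    (∀ p ∈ d.items, ∀ i j : Int, a ≤ i → i < r → 0 ≤ j → j < c → p.1 ≠ i * c + j) →
    (PySem.List.pyRange a r 1).foldl (fun d i =>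
        (PySem.List.pyRange 0 c 1).foldl (fun d j => pvBodyA r c d i j) d) d
      = PySem.Dict.mk (d.items ++ (PySem.List.pyRange a r 1).flatMap
          (fun i => (PySem.List.pyRange 0 c 1).map (fun j => (i * c + j, pvNbrsA r c i j)))) := by
  intro n
  induction n with
  | zero =>
    intro a d hn _
    rw [show PySem.List.pyRange a r 1 = [] from PySem.List.pyRange_one_eq_nil (by omega)]
    simp
  | succ n ih =>
    intro a d hn h
    have har : a < r := by omega
    rw [show PySem.List.pyRange a r 1 = a :: PySem.List.pyRange (a + 1) r 1 from
      PySem.List.pyRange_one_cons har]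
    simp only [List.foldl_cons, List.flatMap_cons]
    rw [pv_rowA r c a (c - 0).toNat 0 d rfl (fun p hp j hj hjc => h p hp a j le_rfl har hj hjc)]
    rw [ih (a + 1) _ (by omega) ?_]
    · simp
    · intro p hp i j hi hir hj hjc
      rcases List.mem_append.mp hp with hp | hp
      · exact h p hp i j (by omega) hir hj hjc
      · rcases List.mem_map.mp hp with ⟨j', hj', rfl⟩
        have hj'b : 0 ≤ j' ∧ j' < c := by
          have := PySem.List.mem_pyRange_one.mp hj'
          exact ⟨this.1, this.2⟩
        simp only [ne_eq]
        intro hEq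
        have hmul : (a + 1) * c ≤ i * c :=
          mul_le_mul_of_nonneg_right (by omega) (by omega)
        nlinarith [hj'b.1, hj'b.2]

lemma pv_foldl_id (l : List Int) (d : PySem.Dict Int (List Int)) :
    l.foldl (fun d _ => d) d = d := by
  induction l <;> simp [*]

-- ========== B-side machinery ==========

-- the grid cells in A's (and B's seeding) enumeration order
def pvGrid (r c : Int) : List (Int × Int) :=
  (PySem.List.pyRange 0 r 1).flatMap (fun i => (PySem.List.pyRange 0 c 1).map (fun j => (i, j)))

-- a dict whose entries are the grid cells, in order, valued by f
def pvMkG (r c : Int) (f : Int × Int → List Int) : PySem.Dict Int (List Int) :=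
  PySem.Dict.mk ((pvGrid r c).map (fun p => (p.1 * c + p.2, f p)))

-- B's per-edge step: append value q.2 to the list of cell q.1
def pvStep (c : Int) (d : PySem.Dict Int (List Int)) (q : (Int × Int) × Int) : PySem.Dict Int (List Int) :=
  d.modify (q.1.1 * c + q.1.2) [] (fun l => l ++ [q.2])

-- B's vertical-edge instruction stream (down-append then up-append, per edge)
def pvVInstrs (r c : Int) : List ((Int × Int) × Int) :=
  (PySem.List.pyRange 0 (r - 1) 1).flatMap (fun i =>
    (PySem.List.pyRange 0 c 1).flatMap (fun j =>
      [((i, j), (i + 1) * c + j), ((i + 1, j), i * c + j)]))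

-- B's horizontal-edge instruction stream (right-append then left-append, per edge)
def pvHInstrs (r c : Int) : List ((Int × Int) × Int) :=
  (PySem.List.pyRange 0 r 1).flatMap (fun i =>
    (PySem.List.pyRange 0 (c - 1) 1).flatMap (fun j =>
      [((i, j), i * c + j + 1), ((i, j + 1), i * c + j)]))

lemma pv_mem_grid {r c : Int} {p : Int × Int} :
    p ∈ pvGrid r c ↔ (0 ≤ p.1 ∧ p.1 < r) ∧ (0 ≤ p.2 ∧ p.2 < c) := by
  rcases p with ⟨i, j⟩
  simp only [pvGrid, List.mem_flatMap, List.mem_map, PySem.List.mem_pyRange_one, Prod.mk.injEq]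
  constructor
  · rintro ⟨a, ha, b, hb, rfl, rfl⟩
    exact ⟨ha, hb⟩
  · rintro ⟨h1, h2⟩
    exact ⟨i, h1, j, h2, rfl, rfl⟩

lemma pv_key_inj {c i1 j1 i2 j2 : Int} (h1 : 0 ≤ j1) (h2 : j1 < c) (h3 : 0 ≤ j2) (h4 : j2 < c)
    (heq : i1 * c + j1 = i2 * c + j2) : i1 = i2 ∧ j1 = j2 := by
  have hc : (0 : Int) < c := by omega
  rcases lt_trichotomy i1 i2 with h | h | h
  · exfalso
    have hx : (i1 + 1) * c ≤ i2 * c := mul_le_mul_of_nonneg_right (by omega) (le_of_lt hc)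
    nlinarith
  · refine ⟨h, ?_⟩
    rw [h] at heq
    omega
  · exfalso
    have hx : (i2 + 1) * c ≤ i1 * c := mul_le_mul_of_nonneg_right (by omega) (le_of_lt hc)
    nlinarith

lemma pv_getD_map (c : Int) (f : Int × Int → List Int) (p0 : Int × Int) :
    ∀ (L : List (Int × Int)), p0 ∈ L → (∀ p ∈ L, p.1 * c + p.2 = p0.1 * c + p0.2 → p = p0) →
    (PySem.Dict.mk (L.map (fun p => (p.1 * c + p.2, f p)))).getD (p0.1 * c + p0.2) [] = f p0 := by
  intro L
  induction L with
  | nil => intro h; simp at h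
  | cons q t ih =>
    intro hmem hinj
    rw [List.map_cons, PySem.Dict.getD_eq_get?_getD, PySem.Dict.get?_mk_cons]
    by_cases hq : q.1 * c + q.2 = p0.1 * c + p0.2
    · have hq' : q = p0 := hinj q (by simp) hq
      subst hq'
      simp [hq]
    · rw [show (q.1 * c + q.2 == p0.1 * c + p0.2) = false by simpa using hq, if_neg (by simp)]
      rw [← PySem.Dict.getD_eq_get?_getD]
      have hp0t : p0 ∈ t := by
        rcases List.mem_cons.mp hmem with heq | hm
        · exact absurd (by rw [heq]) hq
        · exact hm
      exact ih hp0t (fun p hp => hinj p (List.mem_cons_of_mem _ hp))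

lemma pv_contains_map (c : Int) (f : Int × Int → List Int) (p0 : Int × Int)
    (L : List (Int × Int)) (hmem : p0 ∈ L) :
    (PySem.Dict.mk (L.map (fun p => (p.1 * c + p.2, f p)))).contains (p0.1 * c + p0.2) = true := by
  simp only [PySem.Dict.contains, List.any_eq_true]
  exact ⟨(p0.1 * c + p0.2, f p0), List.mem_map.mpr ⟨p0, hmem, rfl⟩, by simp⟩

-- modify at an existing (unique) grid key rewrites that value in place
lemma pv_modify_map (c : Int) (f : Int × Int → List Int) (p0 : Int × Int) (g : List Int → List Int)
    (L : List (Int × Int)) (hmem : p0 ∈ L)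
    (hinj : ∀ p ∈ L, p.1 * c + p.2 = p0.1 * c + p0.2 → p = p0) :
    (PySem.Dict.mk (L.map (fun p => (p.1 * c + p.2, f p)))).modify (p0.1 * c + p0.2) [] g
      = PySem.Dict.mk (L.map (fun p => (p.1 * c + p.2, if p = p0 then g (f p0) else f p))) := by
  simp only [PySem.Dict.modify, pv_getD_map c f p0 L hmem hinj]
  have hcon := pv_contains_map c f p0 L hmem
  simp only [PySem.Dict.insert, hcon, if_pos]
  congr 1
  rw [List.map_map]
  apply List.map_congr_left
  intro p hp
  by_cases hpp : p = p0
  · subst hpp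
    simp
  · have hk : p.1 * c + p.2 ≠ p0.1 * c + p0.2 := fun h => hpp (hinj p hp h)
    simp [Function.comp, hk, hpp]

lemma pvMkG_congr (r c : Int) (f g : Int × Int → List Int)
    (h : ∀ p ∈ pvGrid r c, f p = g p) : pvMkG r c f = pvMkG r c g := by
  unfold pvMkG
  congr 1
  exact List.map_congr_left (fun p hp => by rw [h p hp])

-- a stream of append instructions at grid cells = pointwise list extension
lemma pv_foldl_instrs (r c : Int) (hc : 0 < c) :
    ∀ (instrs : List ((Int × Int) × Int)) (f : Int × Int → List Int),
    (∀ q ∈ instrs, q.1 ∈ pvGrid r c) →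
    instrs.foldl (pvStep c) (pvMkG r c f)
      = pvMkG r c (fun p => f p ++ (instrs.filter (fun q => decide (q.1 = p))).map (fun q => q.2)) := by
  intro instrs
  induction instrs with
  | nil =>
    intro f _
    exact pvMkG_congr r c f _ (by intro p _; simp)
  | cons q0 rest ih =>
    intro f hT
    rw [List.foldl_cons]
    have hmem : q0.1 ∈ pvGrid r c := hT q0 (by simp)
    have hinj : ∀ p ∈ pvGrid r c, p.1 * c + p.2 = q0.1.1 * c + q0.1.2 → p = q0.1 := by
      intro p hp hk
      have hpb := pv_mem_grid.mp hp
      have hqb := pv_mem_grid.mp hmem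
      have hij := pv_key_inj hpb.2.1 hpb.2.2 hqb.2.1 hqb.2.2 hk
      exact Prod.ext_iff.mpr ⟨hij.1, hij.2⟩
    have hstep : pvStep c (pvMkG r c f) q0
        = pvMkG r c (fun p => if p = q0.1 then f q0.1 ++ [q0.2] else f p) := by
      unfold pvStep pvMkG
      exact pv_modify_map c f q0.1 (fun l => l ++ [q0.2]) (pvGrid r c) hmem hinj
    rw [hstep, ih _ (fun q hq => hT q (List.mem_cons_of_mem _ hq))]
    apply pvMkG_congr
    intro p _
    by_cases hpq : p = q0.1
    · subst hpq
      simp [List.filter_cons, List.append_assoc]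
    · have hd : (decide (q0.1 = p)) = false := decide_eq_false (fun h => hpq h.symm)
      simp [List.filter_cons, hd, hpq]

-- flatMap over a range of a function supported at one point
lemma pv_flatMap_single {γ : Type} (h : Int → List γ) (t b : Int) :
    ∀ (n : Nat) (a : Int), (b - a).toNat = n →
    (∀ x, a ≤ x → x < b → x ≠ t → h x = []) →
    (PySem.List.pyRange a b 1).flatMap h = if a ≤ t ∧ t < b then h t else [] := by
  intro n
  induction n with
  | zero =>
    intro a hn _
    rw [PySem.List.pyRange_one_eq_nil (by omega), if_neg (by omega)]
    rfl
  | succ n ih =>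
    intro a hn hz
    have hab : a < b := by omega
    rw [PySem.List.pyRange_one_cons hab, List.flatMap_cons,
      ih (a + 1) (by omega) (fun x h1 h2 h3 => hz x (by omega) h2 h3)]
    by_cases hat : a = t
    · subst hat
      rw [if_neg (by omega), if_pos ⟨le_rfl, hab⟩]
      simp
    · rw [hz a le_rfl hab hat]
      simp only [List.nil_append]
      by_cases hcond : a ≤ t ∧ t < b
      · rw [if_pos (by omega), if_pos hcond]
      · rw [if_neg (by omega), if_neg hcond]

-- flatMap over a range of a function supported at two points t1 < t2
lemma pv_flatMap_double {γ : Type} (h : Int → List γ) (t1 t2 b : Int) (hlt : t1 < t2) :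
    ∀ (n : Nat) (a : Int), (b - a).toNat = n →
    (∀ x, a ≤ x → x < b → x ≠ t1 → x ≠ t2 → h x = []) →
    (PySem.List.pyRange a b 1).flatMap h
      = (if a ≤ t1 ∧ t1 < b then h t1 else []) ++ (if a ≤ t2 ∧ t2 < b then h t2 else []) := by
  intro n
  induction n with
  | zero =>
    intro a hn _
    rw [PySem.List.pyRange_one_eq_nil (by omega), if_neg (by omega), if_neg (by omega)]
    rfl
  | succ n ih =>
    intro a hn hz
    have hab : a < b := by omega
    rw [PySem.List.pyRange_one_cons hab, List.flatMap_cons,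
      ih (a + 1) (by omega) (fun x h1 h2 h3 h4 => hz x (by omega) h2 h3 h4)]
    by_cases hat1 : a = t1
    · rw [if_neg (show ¬(a + 1 ≤ t1 ∧ t1 < b) by omega),
        if_pos (show a ≤ t1 ∧ t1 < b by omega)]
      simp only [List.nil_append]
      rw [if_congr (show (a + 1 ≤ t2 ∧ t2 < b) ↔ (a ≤ t2 ∧ t2 < b) by omega) rfl rfl, hat1]
    · by_cases hat2 : a = t2
      · rw [if_neg (show ¬(a + 1 ≤ t1 ∧ t1 < b) by omega),
          if_neg (show ¬(a + 1 ≤ t2 ∧ t2 < b) by omega),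
          if_neg (show ¬(a ≤ t1 ∧ t1 < b) by omega),
          if_pos (show a ≤ t2 ∧ t2 < b by omega), hat2]
        simp
      · rw [hz a le_rfl hab hat1 hat2]
        simp only [List.nil_append]
        rw [if_congr (show (a + 1 ≤ t1 ∧ t1 < b) ↔ (a ≤ t1 ∧ t1 < b) by omega) rfl rfl,
          if_congr (show (a + 1 ≤ t2 ∧ t2 < b) ↔ (a ≤ t2 ∧ t2 < b) by omega) rfl rfl]

-- fold over a flatMap is the nested fold
lemma pv_foldl_flatMap {α β δ : Type} (g : α → List β) (f : δ → β → δ) :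
    ∀ (l : List α) (init : δ),
    (l.flatMap g).foldl f init = l.foldl (fun s a => (g a).foldl f s) init := by
  intro l
  induction l with
  | nil => intro init; rfl
  | cons x t ih => intro init; simp only [List.flatMap_cons, List.foldl_append, List.foldl_cons, ih]

-- B's vertical pass is exactly the vertical instruction stream
lemma pv_vert_pass (r c : Int) (d : PySem.Dict Int (List Int)) :
    (PySem.List.pyRange 0 (r - 1) 1).foldl (fun d i =>
      (PySem.List.pyRange 0 c 1).foldl (fun d j =>
        (d.modify (i * c + j) [] (fun l => l ++ [i * c + j + c])).modify (i * c + j + c) []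
          (fun l => l ++ [i * c + j])) d) d
      = (pvVInstrs r c).foldl (pvStep c) d := by
  unfold pvVInstrs
  rw [pv_foldl_flatMap]
  apply PySem.List.foldl_congr_mem
  intro d' i _
  rw [pv_foldl_flatMap]
  apply PySem.List.foldl_congr_mem
  intro d'' j _
  simp only [List.foldl_cons, List.foldl_nil, pvStep]
  rw [show (i + 1) * c + j = i * c + j + c from by ring]

-- B's horizontal pass is exactly the horizontal instruction stream
lemma pv_horiz_pass (r c : Int) (d : PySem.Dict Int (List Int)) :
    (PySem.List.pyRange 0 r 1).foldl (fun d i =>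
      (PySem.List.pyRange 0 (c - 1) 1).foldl (fun d j =>
        (d.modify (i * c + j) [] (fun l => l ++ [i * c + j + 1])).modify (i * c + j + 1) []
          (fun l => l ++ [i * c + j])) d) d
      = (pvHInstrs r c).foldl (pvStep c) d := by
  unfold pvHInstrs
  rw [pv_foldl_flatMap]
  apply PySem.List.foldl_congr_mem
  intro d' i _
  rw [pv_foldl_flatMap]
  apply PySem.List.foldl_congr_mem
  intro d'' j _
  simp only [List.foldl_cons, List.foldl_nil, pvStep]
  rw [show i * c + (j + 1) = i * c + j + 1 from by ring]

lemma pv_vinstr_mem (r c : Int) : ∀ q ∈ pvVInstrs r c, q.1 ∈ pvGrid r c := by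
  intro q hq
  simp only [pvVInstrs, List.mem_flatMap, PySem.List.mem_pyRange_one, List.mem_cons,
    List.not_mem_nil, or_false] at hq
  obtain ⟨i, hi, j, hj, hq⟩ := hq
  rcases hq with rfl | rfl <;> simp only [pv_mem_grid] <;> omega

lemma pv_hinstr_mem (r c : Int) : ∀ q ∈ pvHInstrs r c, q.1 ∈ pvGrid r c := by
  intro q hq
  simp only [pvHInstrs, List.mem_flatMap, PySem.List.mem_pyRange_one, List.mem_cons,
    List.not_mem_nil, or_false] at hq
  obtain ⟨i, hi, j, hj, hq⟩ := hq
  rcases hq with rfl | rfl <;> simp only [pv_mem_grid] <;> omega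

-- one vertical-edge row of instructions, filtered at cell p
lemma pv_vrow (c : Int) (p : Int × Int) (hj : 0 ≤ p.2) (hjc : p.2 < c) (i' : Int) :
    (PySem.List.pyRange 0 c 1).flatMap (fun j =>
        (([((i', j), (i' + 1) * c + j), ((i' + 1, j), i' * c + j)]).filter
          (fun q => decide (q.1 = p))).map (fun q => q.2))
      = if i' = p.1 then [(p.1 + 1) * c + p.2]
        else if i' + 1 = p.1 then [i' * c + p.2] else [] := by
  have hz : ∀ x, 0 ≤ x → x < c → x ≠ p.2 →
      (([((i', x), (i' + 1) * c + x), ((i' + 1, x), i' * c + x)]).filter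
        (fun q => decide (q.1 = p))).map (fun q => q.2) = [] := by
    intro x _ _ hx
    have d1 : (decide (((i', x) : Int × Int) = p)) = false := by
      simp only [decide_eq_false_iff_not, Prod.ext_iff]
      exact fun h => hx h.2
    have d2 : (decide (((i' + 1, x) : Int × Int) = p)) = false := by
      simp only [decide_eq_false_iff_not, Prod.ext_iff]
      exact fun h => hx h.2
    simp [List.filter_cons, d1, d2]
  rw [pv_flatMap_single _ p.2 c (c - 0).toNat 0 rfl hz, if_pos ⟨hj, hjc⟩]
  by_cases h1 : i' = p.1
  · have d1 : (decide (((p.1, p.2) : Int × Int) = p)) = true := by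
      simp [Prod.ext_iff]
    have d2 : (decide (((p.1 + 1, p.2) : Int × Int) = p)) = false := by
      simp only [decide_eq_false_iff_not, Prod.ext_iff]
      rintro ⟨h, -⟩
      omega
    rw [if_pos h1]
    simp [List.filter_cons, h1, d1, d2]
  · rw [if_neg h1]
    have d1 : (decide (((i', p.2) : Int × Int) = p)) = false := by
      simp only [decide_eq_false_iff_not, Prod.ext_iff]
      rintro ⟨h, -⟩
      exact h1 h
    by_cases h2 : i' + 1 = p.1
    · have d2 : (decide (((i' + 1, p.2) : Int × Int) = p)) = true := by
        simp [Prod.ext_iff, h2]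
      rw [if_pos h2]
      simp [List.filter_cons, d1, d2]
    · have d2 : (decide (((i' + 1, p.2) : Int × Int) = p)) = false := by
        simp only [decide_eq_false_iff_not, Prod.ext_iff]
        rintro ⟨h, -⟩
        exact h2 h
      rw [if_neg h2]
      simp [List.filter_cons, d1, d2]

-- the vertical instruction stream filtered at a grid cell: up then down
lemma pv_vfilter (r c : Int) (p : Int × Int) (hi : 0 ≤ p.1) (hir : p.1 < r)
    (hj : 0 ≤ p.2) (hjc : p.2 < c) :
    ((pvVInstrs r c).filter (fun q => decide (q.1 = p))).map (fun q => q.2)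
      = (if 0 < p.1 then [(p.1 - 1) * c + p.2] else []) ++
        (if p.1 < r - 1 then [(p.1 + 1) * c + p.2] else []) := by
  unfold pvVInstrs
  simp only [List.filter_flatMap, List.map_flatMap]
  have hrw : ∀ i' : Int, (PySem.List.pyRange 0 c 1).flatMap (fun j =>
      (([((i', j), (i' + 1) * c + j), ((i' + 1, j), i' * c + j)]).filter
        (fun q => decide (q.1 = p))).map (fun q => q.2))
      = if i' = p.1 then [(p.1 + 1) * c + p.2]
        else if i' + 1 = p.1 then [i' * c + p.2] else [] :=
    fun i' => pv_vrow c p hj hjc i'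
  simp only [hrw]
  rw [pv_flatMap_double _ (p.1 - 1) p.1 (r - 1) (by omega) (r - 1 - 0).toNat 0 rfl
    (by intro x _ _ hx1 hx2; rw [if_neg (by omega), if_neg (by omega)])]
  have v1 : (if p.1 - 1 = p.1 then [(p.1 + 1) * c + p.2]
      else if p.1 - 1 + 1 = p.1 then [(p.1 - 1) * c + p.2] else []) = [(p.1 - 1) * c + p.2] := by
    rw [if_neg (by omega), if_pos (by omega)]
  have v2 : (if p.1 = p.1 then [(p.1 + 1) * c + p.2]
      else if p.1 + 1 = p.1 then [p.1 * c + p.2] else []) = [(p.1 + 1) * c + p.2] := if_pos rfl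
  rw [v1, v2, if_congr (show (0 ≤ p.1 - 1 ∧ p.1 - 1 < r - 1) ↔ 0 < p.1 by omega) rfl rfl,
    if_congr (show (0 ≤ p.1 ∧ p.1 < r - 1) ↔ p.1 < r - 1 by omega) rfl rfl]

-- one horizontal-edge row of instructions, filtered at cell p
lemma pv_hrow (c : Int) (p : Int × Int) (hj : 0 ≤ p.2) (hjc : p.2 < c) (i' : Int) :
    (PySem.List.pyRange 0 (c - 1) 1).flatMap (fun j =>
        (([((i', j), i' * c + j + 1), ((i', j + 1), i' * c + j)]).filter
          (fun q => decide (q.1 = p))).map (fun q => q.2))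
      = if i' = p.1 then
          (if 0 < p.2 then [i' * c + p.2 - 1] else []) ++
          (if p.2 < c - 1 then [i' * c + p.2 + 1] else [])
        else [] := by
  by_cases hI : i' = p.1
  · rw [if_pos hI]
    have hz : ∀ x, 0 ≤ x → x < c - 1 → x ≠ p.2 - 1 → x ≠ p.2 →
        (([((i', x), i' * c + x + 1), ((i', x + 1), i' * c + x)]).filter
          (fun q => decide (q.1 = p))).map (fun q => q.2) = [] := by
      intro x _ _ hx1 hx2
      have d1 : (decide (((i', x) : Int × Int) = p)) = false := by
        simp only [decide_eq_false_iff_not, Prod.ext_iff]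
        rintro ⟨-, h⟩
        exact hx2 h
      have d2 : (decide (((i', x + 1) : Int × Int) = p)) = false := by
        simp only [decide_eq_false_iff_not, Prod.ext_iff]
        rintro ⟨-, h⟩
        omega
      simp [List.filter_cons, d1, d2]
    rw [pv_flatMap_double _ (p.2 - 1) p.2 (c - 1) (by omega) (c - 1 - 0).toNat 0 rfl hz]
    have d1a : (decide (((i', p.2 - 1) : Int × Int) = p)) = false := by
      simp only [decide_eq_false_iff_not, Prod.ext_iff]
      rintro ⟨-, h⟩
      omega
    have d1b : (decide (((i', p.2) : Int × Int) = p)) = true := by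
      simp [Prod.ext_iff, hI]
    have d2b : (decide (((i', p.2 + 1) : Int × Int) = p)) = false := by
      simp only [decide_eq_false_iff_not, Prod.ext_iff]
      rintro ⟨-, h⟩
      omega
    have v1 : (([((i', p.2 - 1), i' * c + (p.2 - 1) + 1), ((i', p.2 - 1 + 1), i' * c + (p.2 - 1))]).filter
        (fun q => decide (q.1 = p))).map (fun q => q.2) = [i' * c + p.2 - 1] := by
      simp [List.filter_cons, d1a, d1b]
      omega
    have v2 : (([((i', p.2), i' * c + p.2 + 1), ((i', p.2 + 1), i' * c + p.2)]).filter
        (fun q => decide (q.1 = p))).map (fun q => q.2) = [i' * c + p.2 + 1] := by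
      simp [List.filter_cons, d1b, d2b]
    rw [v1, v2, if_congr (show (0 ≤ p.2 - 1 ∧ p.2 - 1 < c - 1) ↔ 0 < p.2 by omega) rfl rfl,
      if_congr (show (0 ≤ p.2 ∧ p.2 < c - 1) ↔ p.2 < c - 1 by omega) rfl rfl]
  · rw [if_neg hI]
    have hz : ∀ x, 0 ≤ x → x < c - 1 → x ≠ p.2 →
        (([((i', x), i' * c + x + 1), ((i', x + 1), i' * c + x)]).filter
          (fun q => decide (q.1 = p))).map (fun q => q.2) = [] := by
      intro x _ _ _
      have d1 : (decide (((i', x) : Int × Int) = p)) = false := by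
        simp only [decide_eq_false_iff_not, Prod.ext_iff]
        rintro ⟨h, -⟩
        exact hI h
      have d2 : (decide (((i', x + 1) : Int × Int) = p)) = false := by
        simp only [decide_eq_false_iff_not, Prod.ext_iff]
        rintro ⟨h, -⟩
        exact hI h
      simp [List.filter_cons, d1, d2]
    rw [pv_flatMap_single _ p.2 (c - 1) (c - 1 - 0).toNat 0 rfl hz]
    have hp2 : (([((i', p.2), i' * c + p.2 + 1), ((i', p.2 + 1), i' * c + p.2)]).filter
        (fun q => decide (q.1 = p))).map (fun q => q.2) = [] := by
      have d1 : (decide (((i', p.2) : Int × Int) = p)) = false := by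
        simp only [decide_eq_false_iff_not, Prod.ext_iff]
        rintro ⟨h, -⟩
        exact hI h
      have d2 : (decide (((i', p.2 + 1) : Int × Int) = p)) = false := by
        simp only [decide_eq_false_iff_not, Prod.ext_iff]
        rintro ⟨h, -⟩
        exact hI h
      simp [List.filter_cons, d1, d2]
    rw [hp2, ite_self]

-- the horizontal instruction stream filtered at a grid cell: left then right
lemma pv_hfilter (r c : Int) (p : Int × Int) (hi : 0 ≤ p.1) (hir : p.1 < r)
    (hj : 0 ≤ p.2) (hjc : p.2 < c) :
    ((pvHInstrs r c).filter (fun q => decide (q.1 = p))).map (fun q => q.2)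
      = (if 0 < p.2 then [p.1 * c + p.2 - 1] else []) ++
        (if p.2 < c - 1 then [p.1 * c + p.2 + 1] else []) := by
  unfold pvHInstrs
  simp only [List.filter_flatMap, List.map_flatMap]
  have hrw : ∀ i' : Int, (PySem.List.pyRange 0 (c - 1) 1).flatMap (fun j =>
      (([((i', j), i' * c + j + 1), ((i', j + 1), i' * c + j)]).filter
        (fun q => decide (q.1 = p))).map (fun q => q.2))
      = if i' = p.1 then
          (if 0 < p.2 then [i' * c + p.2 - 1] else []) ++
          (if p.2 < c - 1 then [i' * c + p.2 + 1] else [])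
        else [] :=
    fun i' => pv_hrow c p hj hjc i'
  simp only [hrw]
  rw [pv_flatMap_single _ p.1 r (r - 0).toNat 0 rfl
    (by intro x _ _ hx; rw [if_neg hx]), if_pos ⟨hi, hir⟩, if_pos rfl]

-- the seeding pass builds the grid dict with empty values
lemma pv_keys_aux (r c : Int) (hc : 0 < c) : ∀ (n : Nat) (a : Int), (r - a).toNat = n →
    (PySem.List.pyRange a r 1).flatMap (fun i => (PySem.List.pyRange 0 c 1).map (fun j => i * c + j))
      = PySem.List.pyRange (a * c) (r * c) 1 := by
  intro n
  induction n with
  | zero =>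
    intro a hn
    rw [PySem.List.pyRange_one_eq_nil (show r ≤ a by omega),
      PySem.List.pyRange_one_eq_nil (mul_le_mul_of_nonneg_right (show r ≤ a by omega) (by omega))]
    rfl
  | succ n ih =>
    intro a hn
    have har : a < r := by omega
    rw [PySem.List.pyRange_one_cons har, List.flatMap_cons, ih (a + 1) (by omega)]
    rw [PySem.List.pyRange_one_append (a * c) ((a + 1) * c) (r * c)
      (mul_le_mul_of_nonneg_right (by omega) (by omega))
      (mul_le_mul_of_nonneg_right (by omega) (by omega))]
    congr 1
    rw [PySem.List.pyRange_one 0 c, PySem.List.pyRange_one (a * c) ((a + 1) * c)]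
    rw [show (a + 1) * c - a * c = c by ring]
    simp only [Int.sub_zero, List.map_map]
    apply List.map_congr_left
    intro k _
    simp [Function.comp]

lemma pv_keys_eq (r c : Int) (hc : 0 < c) :
    (pvGrid r c).map (fun p => p.1 * c + p.2) = PySem.List.pyRange 0 (r * c) 1 := by
  unfold pvGrid
  rw [List.map_flatMap]
  have h := pv_keys_aux r c hc (r - 0).toNat 0 rfl
  rw [show (0 : Int) * c = 0 from by ring] at h
  have hfun : (fun i : Int => ((PySem.List.pyRange 0 c 1).map (fun j => ((i, j) : Int × Int))).map
      (fun p => p.1 * c + p.2)) = (fun i : Int => (PySem.List.pyRange 0 c 1).map (fun j => i * c + j)) := by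
    funext i
    rw [List.map_map]
    rfl
  rw [hfun, h]

lemma pv_seed (r c : Int) (hc : 0 < c) :
    (PySem.List.pyRange 0 r 1).foldl (fun d i =>
      (PySem.List.pyRange 0 c 1).foldl (fun d j => d.insert (i * c + j) ([] : List Int)) d)
      (PySem.Dict.empty : PySem.Dict Int (List Int))
      = pvMkG r c (fun _ => []) := by
  have h1 : (PySem.List.pyRange 0 r 1).foldl (fun d i =>
      (PySem.List.pyRange 0 c 1).foldl (fun d j => d.insert (i * c + j) ([] : List Int)) d)
      (PySem.Dict.empty : PySem.Dict Int (List Int))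
      = (pvGrid r c).foldl (fun d p => d.insert (p.1 * c + p.2) ([] : List Int)) PySem.Dict.empty := by
    unfold pvGrid
    rw [pv_foldl_flatMap]
    apply PySem.List.foldl_congr_mem
    intro d i _
    rw [List.foldl_map]
  rw [h1]
  apply PySem.Dict.ext
  have hfresh := PySem.Dict.items_foldl_insert_fresh (pvGrid r c) (fun p => p.1 * c + p.2)
    (fun _ => ([] : List Int)) PySem.Dict.empty (by intro a _; simp)
    (by rw [pv_keys_eq r c hc]; simp [PySem.List.nodup_pyRange_one])
  simp only at hfresh
  rw [hfresh]
  simp [pvMkG, PySem.Dict.empty]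

-- the A-side result, as the grid dict valued by pvNbrsA
lemma pv_A_dict (r c : Int) :
    PySem.Dict.mk ((PySem.Dict.empty : PySem.Dict Int (List Int)).items ++
      (PySem.List.pyRange 0 r 1).flatMap (fun i =>
        (PySem.List.pyRange 0 c 1).map (fun j => (i * c + j, pvNbrsA r c i j))))
      = pvMkG r c (fun p => pvNbrsA r c p.1 p.2) := by
  unfold pvMkG pvGrid
  congr 1
  rw [List.map_flatMap]
  have hemp : (PySem.Dict.empty : PySem.Dict Int (List Int)).items = [] := rfl
  rw [hemp, List.nil_append]
  have hrow : (fun i : Int => ((PySem.List.pyRange 0 c 1).map (fun j => ((i, j) : Int × Int))).map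
      (fun p => (p.1 * c + p.2, pvNbrsA r c p.1 p.2)))
      = (fun i : Int => (PySem.List.pyRange 0 c 1).map (fun j => (i * c + j, pvNbrsA r c i j))) := by
    funext i
    rw [List.map_map]
    rfl
  rw [hrow]

-- ===== VERDICT (by name: the statement is the Claim_ definition above) =====
theorem rectangular_four_neighbors_spec : Claim_equal_rectangular_four_neighbors := by
  intro r c _
  unfold Spec_rectangular_four_neighbors
  unfold rectangular_four_neighbors rectangular_four_neighbors_alt
  dsimp only
  by_cases hr : r ≤ 0
  · rw [PySem.List.pyRange_one_eq_nil (show r ≤ (0 : Int) from hr),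
      PySem.List.pyRange_one_eq_nil (show r - 1 ≤ (0 : Int) by omega)]
    simp only [List.foldl_nil]
  · by_cases hcn : c ≤ 0
    · rw [PySem.List.pyRange_one_eq_nil (show c ≤ (0 : Int) from hcn),
        PySem.List.pyRange_one_eq_nil (show c - 1 ≤ (0 : Int) by omega)]
      simp only [List.foldl_nil, pv_foldl_id]
    · have hc : (0 : Int) < c := by omega
      show (false, ((PySem.List.pyRange 0 r 1).foldl (fun d i =>
          (PySem.List.pyRange 0 c 1).foldl (fun d j => pvBodyA r c d i j) d)
          (PySem.Dict.empty : PySem.Dict Int (List Int))).items) = _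
      rw [pv_outerA r c hc (r - 0).toNat 0 PySem.Dict.empty rfl
        (by intro p hp; simp [PySem.Dict.empty] at hp)]
      rw [pv_A_dict r c]
      rw [pv_seed r c hc]
      rw [pv_vert_pass r c, pv_horiz_pass r c]
      rw [pv_foldl_instrs r c hc (pvVInstrs r c) (fun _ => []) (pv_vinstr_mem r c)]
      rw [pv_foldl_instrs r c hc (pvHInstrs r c) _ (pv_hinstr_mem r c)]
      refine congrArg (fun d : PySem.Dict Int (List Int) => ((false : Bool), d.items))
        (pvMkG_congr r c _ _ ?_)
      intro p hp
      obtain ⟨⟨hi, hir⟩, hj, hjc⟩ := pv_mem_grid.mp hp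
      rw [pv_vfilter r c p hi hir hj hjc, pv_hfilter r c p hi hir hj hjc]
      simp [pvNbrsA, List.append_assoc]
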